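-- pv_equiv track=rewrite | github.com/g-s01/data-programming-btp | gautam-results-and-analysis/raw-to-fine-direct/through-lfs/context-window-one/lfs_for_raw_sentence_gpt.py | label_sentence_Person_Medical
-- ===== SOURCE A (Python) =====
-- ABSTAIN = -1
--
-- Person_OtherPER = 1
--
-- Person_Artist = 2
--
-- Person_Athlete = 4
--
-- MEDICAL_MEDICATION_VACCINE = 6
--
-- MEDICAL_DISEASE = 7
--
-- Person_Politician = 14
--
-- Person_Scientist = 20
--
-- Person_SportsManager = 21
--
-- Medical_AnatomicalStructure = 23
--
-- Person_Cleric = 25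
--
-- Medical_MedicalProcedure = 26
--
-- Medical_Symptom = 31
--
-- def label_sentence_Person_Medical(tokens):
--     """
--     Labels each token in a sentence with a fine-grained label based on context.
--     Returns a list of fine-grained labels for each token.
--
--     Args:
--     tokens: list of str - A list of words representing a sentence.
--
--     Returns:
--     list of str - A list of fine-grained labels for each token.
--     """
--     # Define fine-grained context for Person and Medical
--     fine_label_context = {
--         # Person subtypes
--         Person_Scientist: {'murray', 'curie', 'einstein', 'darwin', 'researcher', 'biologist'},
--         Person_Artist: {'composer', 'painter', 'sculptor', 'poet', 'actor', 'maharishi', 'yogi'},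
--         Person_Athlete: {'player', 'athlete', 'runner', 'gymnast', 'swimmer'},
--         Person_Politician: {'senator', 'president', 'minister', 'leader', 'trudeau'},
--         Person_Cleric: {'priest', 'imam', 'bishop', 'monk'},
--         Person_SportsManager: {'coach', 'trainer', 'manager'},
--         Person_OtherPER: {'author', 'critic', 'historian', 'philosopher', 'founder', 'joseph', 'shales'},
--
--         # Medical subtypes
--         MEDICAL_MEDICATION_VACCINE: {'drug', 'vaccine', 'medication', 'antibiotic'},
--         Medical_MedicalProcedure: {'surgery', 'transplantation', 'therapy', 'meditation', 'procedure'},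
--         Medical_AnatomicalStructure: {'heart', 'brain', 'lung', 'kidney', 'muscle'},
--         Medical_Symptom: {'pain', 'fatigue', 'fever', 'aids', 'cough', 'dizziness'},
--         MEDICAL_DISEASE: {'cancer', 'diabetes', 'influenza', 'infection', 'disease'}
--     }
--
--     labels = []
--
--     for token in tokens:
--         token_lower = token.lower()
--         fine_label = ABSTAIN  # Default label
--
--         for label, keywords in fine_label_context.items():
--             if token_lower in keywords:
--                 fine_label = label
--                 break
--
--         labels.append(fine_label)
--
--     return labels
-- ===== SOURCE B (Python) =====
-- ABSTAIN = -1
--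
-- # One flat keyword -> label dict, written out once (the 62 keywords are pairwise
-- # distinct across the original categories, so a flat dict is exactly equivalent
-- # to the original first-matching-category scan).
-- _INDEX = {
--     'murray': 20, 'curie': 20, 'einstein': 20, 'darwin': 20, 'researcher': 20, 'biologist': 20,
--     'composer': 2, 'painter': 2, 'sculptor': 2, 'poet': 2, 'actor': 2, 'maharishi': 2, 'yogi': 2,
--     'player': 4, 'athlete': 4, 'runner': 4, 'gymnast': 4, 'swimmer': 4,
--     'senator': 14, 'president': 14, 'minister': 14, 'leader': 14, 'trudeau': 14,
--     'priest': 25, 'imam': 25, 'bishop': 25, 'monk': 25,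
--     'coach': 21, 'trainer': 21, 'manager': 21,
--     'author': 1, 'critic': 1, 'historian': 1, 'philosopher': 1, 'founder': 1, 'joseph': 1, 'shales': 1,
--     'drug': 6, 'vaccine': 6, 'medication': 6, 'antibiotic': 6,
--     'surgery': 26, 'transplantation': 26, 'therapy': 26, 'meditation': 26, 'procedure': 26,
--     'heart': 23, 'brain': 23, 'lung': 23, 'kidney': 23, 'muscle': 23,
--     'pain': 31, 'fatigue': 31, 'fever': 31, 'aids': 31, 'cough': 31, 'dizziness': 31,
--     'cancer': 7, 'diabetes': 7, 'influenza': 7, 'infection': 7, 'disease': 7,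
-- }
--
--
-- def label_sentence_Person_Medical(tokens):
--     return [_INDEX.get(t.lower(), ABSTAIN) for t in tokens]
-- ===== Notes on version B (the rewrite author's own statement) =====
-- stated objective: faster
-- what changed: Replaces the per-token scan over 12 keyword sets (dict of sets plus break) with one flat keyword->label dict, so labelling each token is a single hash lookup; correct because the 62 keywords are pairwise distinct across categories.
import Mathlib
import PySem

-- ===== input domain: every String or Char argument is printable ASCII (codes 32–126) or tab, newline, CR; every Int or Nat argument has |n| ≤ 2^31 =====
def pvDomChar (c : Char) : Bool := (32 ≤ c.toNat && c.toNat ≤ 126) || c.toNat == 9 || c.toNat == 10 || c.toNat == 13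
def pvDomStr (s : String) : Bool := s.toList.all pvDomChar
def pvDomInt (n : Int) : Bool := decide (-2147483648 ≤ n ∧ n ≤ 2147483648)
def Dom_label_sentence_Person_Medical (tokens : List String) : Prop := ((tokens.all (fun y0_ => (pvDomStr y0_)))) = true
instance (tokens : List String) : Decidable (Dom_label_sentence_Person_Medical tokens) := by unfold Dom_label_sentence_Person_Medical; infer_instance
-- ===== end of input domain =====

-- B replaces A's per-token scan over the 12 keyword sets by one flat keyword->label
-- dict (a single hash lookup per token); equivalent since the keywords are pairwise distinct.

-- ===== PORT A =====
-- fine_label_context, in insertion order, as (label, keyword set) items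
def pvContextA : List (Int × PySem.Set String) :=
  [ (20, PySem.Set.ofList ["murray", "curie", "einstein", "darwin", "researcher", "biologist"]),
    (2,  PySem.Set.ofList ["composer", "painter", "sculptor", "poet", "actor", "maharishi", "yogi"]),
    (4,  PySem.Set.ofList ["player", "athlete", "runner", "gymnast", "swimmer"]),
    (14, PySem.Set.ofList ["senator", "president", "minister", "leader", "trudeau"]),
    (25, PySem.Set.ofList ["priest", "imam", "bishop", "monk"]),
    (21, PySem.Set.ofList ["coach", "trainer", "manager"]),
    (1,  PySem.Set.ofList ["author", "critic", "historian", "philosopher", "founder", "joseph", "shales"]),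
    (6,  PySem.Set.ofList ["drug", "vaccine", "medication", "antibiotic"]),
    (26, PySem.Set.ofList ["surgery", "transplantation", "therapy", "meditation", "procedure"]),
    (23, PySem.Set.ofList ["heart", "brain", "lung", "kidney", "muscle"]),
    (31, PySem.Set.ofList ["pain", "fatigue", "fever", "aids", "cough", "dizziness"]),
    (7,  PySem.Set.ofList ["cancer", "diabetes", "influenza", "infection", "disease"]) ]

-- the inner 'for label, keywords ... if token_lower in keywords: fine_label = label; break' loop
def pvScanA (tLower : String) : List (Int × PySem.Set String) → Int
  | [] => -1
  | (label, keywords) :: rest =>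
      if PySem.Set.contains keywords tLower then label else pvScanA tLower rest

def label_sentence_Person_Medical (tokens : List String) : List Int :=
  tokens.foldl (fun labels token => labels ++ [pvScanA (PySem.Str.lower token) pvContextA]) []

-- ===== PORT B =====
-- _INDEX: the flat keyword -> label dict literal
def pvIndexB : PySem.Dict String Int :=
  PySem.Dict.ofList
    [ ("murray", 20), ("curie", 20), ("einstein", 20), ("darwin", 20), ("researcher", 20), ("biologist",
    20), ("composer", 2), ("painter", 2), ("sculptor", 2), ("poet", 2), ("actor", 2), ("maharishi", 2),
    ("yogi", 2), ("player", 4), ("athlete", 4), ("runner", 4), ("gymnast", 4), ("swimmer", 4),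
    ("senator", 14), ("president", 14), ("minister", 14), ("leader", 14), ("trudeau", 14), ("priest",
    25), ("imam", 25), ("bishop", 25), ("monk", 25), ("coach", 21), ("trainer", 21), ("manager", 21),
    ("author", 1), ("critic", 1), ("historian", 1), ("philosopher", 1), ("founder", 1), ("joseph", 1),
    ("shales", 1), ("drug", 6), ("vaccine", 6), ("medication", 6), ("antibiotic", 6), ("surgery", 26),
    ("transplantation", 26), ("therapy", 26), ("meditation", 26), ("procedure", 26), ("heart", 23),
    ("brain", 23), ("lung", 23), ("kidney", 23), ("muscle", 23), ("pain", 31), ("fatigue", 31),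
    ("fever", 31), ("aids", 31), ("cough", 31), ("dizziness", 31), ("cancer", 7), ("diabetes", 7),
    ("influenza", 7), ("infection", 7), ("disease", 7) ]

def label_sentence_Person_Medical_alt (tokens : List String) : List Int :=
  tokens.map (fun t => pvIndexB.getD (PySem.Str.lower t) (-1))

-- ===== PRECONDITION & SPEC =====
def Spec_label_sentence_Person_Medical (tokens : List String) (out : List Int) : Prop := out = label_sentence_Person_Medical_alt tokens
instance (tokens : List String) (out : List Int) : Decidable (Spec_label_sentence_Person_Medical tokens out) := by unfold Spec_label_sentence_Person_Medical; infer_instance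

-- ===== CLAIM (what is proved, stated in full; the proofs are below) =====
def Claim_equal_label_sentence_Person_Medical : Prop := ∀ (tokens : List String), Dom_label_sentence_Person_Medical tokens → Spec_label_sentence_Person_Medical tokens (label_sentence_Person_Medical tokens)

-- ===== LEMMAS AND PROOFS =====

-- the raw category table (labels with keyword lists) behind A's dict of sets
def pvCats : List (Int × List String) :=
  [ (20, ["murray", "curie", "einstein", "darwin", "researcher", "biologist"]),
    (2,  ["composer", "painter", "sculptor", "poet", "actor", "maharishi", "yogi"]),
    (4,  ["player", "athlete", "runner", "gymnast", "swimmer"]),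
    (14, ["senator", "president", "minister", "leader", "trudeau"]),
    (25, ["priest", "imam", "bishop", "monk"]),
    (21, ["coach", "trainer", "manager"]),
    (1,  ["author", "critic", "historian", "philosopher", "founder", "joseph", "shales"]),
    (6,  ["drug", "vaccine", "medication", "antibiotic"]),
    (26, ["surgery", "transplantation", "therapy", "meditation", "procedure"]),
    (23, ["heart", "brain", "lung", "kidney", "muscle"]),
    (31, ["pain", "fatigue", "fever", "aids", "cough", "dizziness"]),
    (7,  ["cancer", "diabetes", "influenza", "infection", "disease"]) ]

-- first-match lookup in a block of keys all mapped to the same label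
lemma get?_mk_block (t : String) (l : Int) (ks : List String) (rest : List (String × Int)) :
    (PySem.Dict.mk (ks.map (fun k => (k, l)) ++ rest)).get? t
      = if ks.contains t then some l else (PySem.Dict.mk rest).get? t := by
  induction ks with
  | nil => simp
  | cons k ks ih =>
      rw [List.map_cons, List.cons_append, PySem.Dict.get?_mk_cons, ih]
      by_cases hk : k = t
      · simp [hk]
      · simp [hk, Ne.symm hk]

-- the category scan equals lookup in the flattened association list
lemma scan_eq_flat (t : String) (cats : List (Int × List String)) :
    pvScanA t (cats.map (fun p => (p.1, PySem.Set.ofList p.2)))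
      = ((PySem.Dict.mk (cats.flatMap (fun p => p.2.map (fun k => (k, p.1))))).get? t).getD (-1) := by
  induction cats with
  | nil => rfl
  | cons p rest ih =>
      obtain ⟨l, ks⟩ := p
      simp only [List.map_cons, pvScanA, List.flatMap_cons, get?_mk_block]
      by_cases h : ks.contains t
      · simp [PySem.Set.contains, PySem.Set.mem_ofList, List.contains_iff_mem.mp h]
      · have hns : ¬ t ∈ PySem.Set.ofList ks := by
          simpa [PySem.Set.mem_ofList] using (fun hm => h (List.contains_iff_mem.mpr hm))
        simp only [h, PySem.Set.contains]
        rw [if_neg (by simpa using hns)]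
        exact ih

lemma contextA_eq : pvContextA = pvCats.map (fun p => (p.1, PySem.Set.ofList p.2)) := by
  set_option maxRecDepth 8192 in decide

-- B's flat dict is the flattened association list of A's category table
lemma index_eq_flat :
    pvIndexB = PySem.Dict.mk (pvCats.flatMap (fun p => p.2.map (fun k => (k, p.1)))) := by
  set_option maxRecDepth 8192 in decide

-- ===== VERDICT (by name: the statement is the Claim_ definition above) =====
theorem label_sentence_Person_Medical_spec : Claim_equal_label_sentence_Person_Medical := by
  intro tokens _
  unfold Spec_label_sentence_Person_Medical label_sentence_Person_Medical label_sentence_Person_Medical_alt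
  rw [PySem.List.foldl_append_singleton_eq_map]
  refine List.map_congr_left (fun t _ => ?_)
  rw [contextA_eq, scan_eq_flat, index_eq_flat, PySem.Dict.getD_eq_get?_getD]
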